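-- pv_equiv track=rewrite | github.com/AndreAH2207/Trabajos-en-Python | Python Semana 14/PC2-Ejercicio1.py | sumatoria_numeros_perfectos
-- ===== SOURCE A (Python) =====
-- def saber_si_es_numero_perfecto(n):
--         suma = 0
--
--         for i in range(1, n):
--             if n % i == 0:
--                 suma += i
--
--         if n == suma:
--             return True
--         else:
--             return False
--
-- def sumatoria_numeros_perfectos(n, N):
--         numeros_perfectos = []
--         num = 2
--         while len(numeros_perfectos) < n and num <= N:
--             if saber_si_es_numero_perfecto(num):
--                 numeros_perfectos.append(num)
--             num += 1
--
--         return sum(numeros_perfectos)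
-- ===== SOURCE B (Python) =====
-- def _es_perfecto(m):
--     # proper-divisor sum via divisor pairs up to sqrt(m)
--     if m < 2:
--         return False
--     s = 1
--     i = 2
--     while i * i <= m:
--         if m % i == 0:
--             j = m // i
--             s += i
--             if j != i:
--                 s += j
--         i += 1
--     return s == m
--
-- def sumatoria_numeros_perfectos(n, N):
--     total = 0
--     count = 0
--     for num in range(2, N + 1):
--         if count >= n:
--             break
--         if _es_perfecto(num):
--             total += num
--             count += 1
--     return total
-- ===== Notes on version B (the rewrite author's own statement) =====
-- stated objective: faster
-- what changed: The perfect-number test now sums proper divisors by scanning divisor pairs (i, num//i) only up to sqrt(num) instead of trial-dividing by every i < num, and the outer loop keeps a running total and count instead of building a list.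
import Mathlib
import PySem

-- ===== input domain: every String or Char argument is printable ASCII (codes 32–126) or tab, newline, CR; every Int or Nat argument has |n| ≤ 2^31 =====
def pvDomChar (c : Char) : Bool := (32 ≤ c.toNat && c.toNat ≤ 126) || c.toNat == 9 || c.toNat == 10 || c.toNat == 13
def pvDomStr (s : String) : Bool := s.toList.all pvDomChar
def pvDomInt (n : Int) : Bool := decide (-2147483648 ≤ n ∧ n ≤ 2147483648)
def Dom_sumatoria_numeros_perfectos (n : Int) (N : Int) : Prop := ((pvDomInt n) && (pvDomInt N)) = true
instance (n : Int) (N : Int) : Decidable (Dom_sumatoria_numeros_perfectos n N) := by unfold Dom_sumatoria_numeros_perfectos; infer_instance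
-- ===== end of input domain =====

-- B replaces A's O(num) trial-division perfect test by a divisor-pair scan up to sqrt(num) and keeps
-- a running total/count instead of a list (objective: faster, asymptotically in the divisor test).

-- ===== PORT A =====
def saber_si_es_numero_perfecto (m : Int) : Bool :=
  let suma := (PySem.List.pyRange 1 m 1).foldl
      (fun suma i => if PySem.Int.mod m i == 0 then suma + i else suma) 0
  if m == suma then true else false

def pvLoopA (n N : Int) (nums : List Int) (num : Int) : List Int :=
  if _h : (nums.length : Int) < n ∧ num ≤ N then
    pvLoopA n N (if saber_si_es_numero_perfecto num then nums ++ [num] else nums) (num + 1)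
  else nums
termination_by (N + 1 - num).toNat
decreasing_by omega

def sumatoria_numeros_perfectos (n : Int) (N : Int) : Int :=
  (pvLoopA n N [] 2).sum

-- ===== PORT B =====
def pvDivLoop (m : Int) (i : Int) (s : Int) : Int :=
  if _h : i * i ≤ m then
    pvDivLoop m (i + 1)
      (if PySem.Int.mod m i == 0 then
        (let j := PySem.Int.floordiv m i
         let s' := s + i
         if j != i then s' + j else s')
       else s)
  else s
termination_by (m + 2 - i).toNat
decreasing_by
  have h1 : 2 * i ≤ i * i + 1 := by nlinarith [mul_self_nonneg (i - 1)]
  have h2 : 0 ≤ i * i := mul_self_nonneg i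
  omega

def es_perfecto (m : Int) : Bool :=
  if m < 2 then false else pvDivLoop m 2 1 == m

def pvLoopB (n : Int) : List Int → Int → Int → Int
  | [], total, _ => total
  | num :: rest, total, count =>
    if count ≥ n then total
    else if es_perfecto num then pvLoopB n rest (total + num) (count + 1)
    else pvLoopB n rest total count

def sumatoria_numeros_perfectos_alt (n : Int) (N : Int) : Int :=
  pvLoopB n (PySem.List.pyRange 2 (N + 1) 1) 0 0

-- ===== PRECONDITION & SPEC =====
def Spec_sumatoria_numeros_perfectos (n : Int) (N : Int) (out : Int) : Prop := out = sumatoria_numeros_perfectos_alt n N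
instance (n : Int) (N : Int) (out : Int) : Decidable (Spec_sumatoria_numeros_perfectos n N out) := by unfold Spec_sumatoria_numeros_perfectos; infer_instance

-- ===== CLAIM (what is proved, stated in full; the proofs are below) =====
def Claim_equal_sumatoria_numeros_perfectos : Prop := ∀ (n : Int) (N : Int), Dom_sumatoria_numeros_perfectos n N → Spec_sumatoria_numeros_perfectos n N (sumatoria_numeros_perfectos n N)

-- ===== LEMMAS AND PROOFS =====

-- fold of a conditional accumulator is an initial value plus a sum
lemma pv_foldl_ite_add (P : Int → Bool) (l : List Int) (s : Int) :
    l.foldl (fun s i => if P i then s + i else s) s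
      = s + (l.map (fun i => if P i then i else 0)).sum := by
  induction l generalizing s with
  | nil => simp
  | cons a l ih =>
    by_cases h : P a
    · simp [h, ih]
      ring
    · simp [h, ih]

-- sum of a cast-valued map over an Int range is a Nat Finset sum
lemma pv_bridge (a b : Int) (ha : 0 ≤ a) (g : Int → Int) (gN : Nat → Nat)
    (hg : ∀ k : Nat, a.toNat ≤ k → k < b.toNat → g (k : Int) = (gN k : Int)) :
    ((PySem.List.pyRange a b 1).map g).sum
      = ((∑ d ∈ Finset.Ico a.toNat b.toNat, gN d : Nat) : Int) := by
  rw [PySem.List.pyRange_one, List.map_map]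
  have h1 : ((List.range (b - a).toNat).map (g ∘ fun (k : Nat) => a + (k : Int))).sum
      = ∑ i ∈ Finset.range (b - a).toNat, g (a + (i : Int)) := rfl
  rw [h1]
  rw [Finset.sum_Ico_eq_sum_range gN a.toNat b.toNat]
  by_cases hab : a ≤ b
  · have hK : b.toNat - a.toNat = (b - a).toNat := by omega
    rw [hK, Nat.cast_sum]
    apply Finset.sum_congr rfl
    intro i hi
    rw [Finset.mem_range] at hi
    have h2 : a + (i : Int) = ((a.toNat + i : Nat) : Int) := by push_cast; omega
    rw [h2, hg (a.toNat + i) (by omega) (by omega)]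
  · have hb : (b - a).toNat = 0 := by omega
    have hb' : b.toNat - a.toNat = 0 := by omega
    simp [hb, hb']

-- the Nat-side per-candidate contribution of B's divisor loop
def pvC (M k : Nat) : Nat := if k ∣ M then k + (if M / k ≠ k then M / k else 0) else 0

-- the core number-theory fact: proper-divisor sum equals 1 + paired contributions up to sqrt
lemma pv_core (M : Nat) (hM : 2 ≤ M) :
    ∑ d ∈ (Finset.Ico 1 M).filter (· ∣ M), d
      = 1 + ∑ k ∈ Finset.Ico 2 (Nat.sqrt M + 1), pvC M k := by
  have hM0 : M ≠ 0 := by omega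
  set r := Nat.sqrt M with hrdef
  have hr1 : 1 ≤ r := Nat.le_sqrt.mpr (show 1 * 1 ≤ M by omega)
  have hrM : r < M := Nat.sqrt_lt_self (by omega)
  have hrr : r * r ≤ M := Nat.sqrt_le M
  set S : Finset Nat := (Finset.Ico 2 (r + 1)).filter (· ∣ M) with hSdef
  set T : Finset Nat := S.filter (fun k => M / k ≠ k) with hTdef
  set P : Finset Nat := (Finset.Ico 1 M).filter (· ∣ M) with hPdef
  have hRHS : ∑ k ∈ Finset.Ico 2 (r + 1), pvC M k
      = (∑ k ∈ S, k) + ∑ k ∈ T, M / k := by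
    simp only [pvC]
    rw [← Finset.sum_filter (· ∣ M) (fun k => k + (if M / k ≠ k then M / k else 0)), ← hSdef]
    rw [Finset.sum_add_distrib]
    congr 1
    rw [Finset.sum_filter (fun k => M / k ≠ k) (fun k => M / k)]
  have hsplit := Finset.sum_filter_add_sum_filter_not P (· ≤ r) id
  have h1 : P.filter (· ≤ r) = insert 1 S := by
    ext d
    simp only [hPdef, hSdef, Finset.mem_filter, Finset.mem_Ico, Finset.mem_insert]
    constructor
    · rintro ⟨⟨⟨hd1, hdM⟩, hdvd⟩, hdr⟩
      by_cases hd : d = 1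
      · exact Or.inl hd
      · exact Or.inr ⟨⟨by omega, by omega⟩, hdvd⟩
    · rintro (rfl | ⟨⟨hd2, hdr⟩, hdvd⟩)
      · exact ⟨⟨⟨by omega, by omega⟩, one_dvd M⟩, hr1⟩
      · exact ⟨⟨⟨by omega, by omega⟩, hdvd⟩, by omega⟩
  have h1n : (1 : Nat) ∉ S := by
    simp [hSdef]
  have h2 : ∑ k ∈ T, M / k = ∑ d ∈ P.filter (fun d => ¬ d ≤ r), d := by
    refine Finset.sum_nbij' (i := fun k => M / k) (j := fun d => M / d) ?_ ?_ ?_ ?_ ?_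
    · -- a divisor pair partner of a small divisor is a large proper divisor
      intro k hk
      simp only [hTdef, hSdef, hPdef, Finset.mem_filter, Finset.mem_Ico] at hk ⊢
      obtain ⟨⟨⟨hk2, hkr⟩, hdvd⟩, hne⟩ := hk
      have hdd : M / k ∣ M := Nat.div_dvd_of_dvd hdvd
      have hlt : M / k < M := Nat.div_lt_self (by omega) (by omega)
      have hkq : k * (M / k) = M := Nat.mul_div_cancel' hdvd
      have hq0 : M / k ≠ 0 := by
        intro h0
        rw [h0, Nat.mul_zero] at hkq
        omega
      refine ⟨⟨⟨Nat.pos_of_ne_zero hq0, hlt⟩, hdd⟩, ?_⟩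
      intro hqr
      have hkr' : k ≤ r := by omega
      have hle1 : k * (M / k) ≤ r * (M / k) := Nat.mul_le_mul_right (M / k) hkr'
      have hle2 : r * (M / k) ≤ r * r := Nat.mul_le_mul_left r hqr
      have hqe : M / k = r := by
        have h4 : r * r ≤ r * (M / k) := by omega
        have := Nat.le_of_mul_le_mul_left h4 (by omega)
        omega
      have hke : k = r := by
        have h5 : k * (M / k) = k * r := by rw [hqe]
        have h3 : r * r ≤ k * r := by omega
        have := Nat.le_of_mul_le_mul_right h3 (by omega)
        omega
      exact hne (by omega)
    · -- a large proper divisor pairs back to a small divisor below sqrt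
      intro d hd
      simp only [hTdef, hSdef, hPdef, Finset.mem_filter, Finset.mem_Ico] at hd ⊢
      obtain ⟨⟨⟨hd1, hdM⟩, hdvd⟩, hdr⟩ := hd
      have hddvd : M / d ∣ M := Nat.div_dvd_of_dvd hdvd
      have hdq : d * (M / d) = M := Nat.mul_div_cancel' hdvd
      have hdd : M / (M / d) = d := Nat.div_div_self hdvd hM0
      have hMd : M < d * d := Nat.sqrt_lt.mp (by omega)
      have hq0 : M / d ≠ 0 := by
        intro h0
        rw [h0, Nat.mul_zero] at hdq
        omega
      have hq1 : M / d ≠ 1 := by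
        intro h0
        rw [h0, Nat.mul_one] at hdq
        omega
      have hqd : M / d < d := by
        apply Nat.lt_of_mul_lt_mul_left (a := d)
        omega
      have hqr : M / d ≤ r := by
        apply Nat.le_sqrt.mpr
        calc M / d * (M / d) ≤ M / d * d := Nat.mul_le_mul_left _ (by omega)
          _ = d * (M / d) := Nat.mul_comm _ _
          _ = M := hdq
      have h2q : 2 ≤ M / d := Nat.lt_of_le_of_ne (Nat.one_le_iff_ne_zero.mpr hq0) (Ne.symm hq1)
      have hlt2 : M / d < r + 1 := Nat.lt_succ_of_le hqr
      have hne2 : M / (M / d) ≠ M / d := by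
        rw [hdd]
        intro h0
        apply hdr
        rw [h0]
        exact hqr
      exact ⟨⟨⟨h2q, hlt2⟩, hddvd⟩, hne2⟩
    · -- left inverse
      intro k hk
      simp only [hTdef, hSdef, Finset.mem_filter, Finset.mem_Ico] at hk
      exact Nat.div_div_self hk.1.2 hM0
    · -- right inverse
      intro d hd
      simp only [hPdef, Finset.mem_filter, Finset.mem_Ico] at hd
      exact Nat.div_div_self hd.1.2 hM0
    · intro k _
      rfl
  have hfin : ∑ d ∈ insert 1 S, (d : Nat) = 1 + ∑ d ∈ S, d := Finset.sum_insert h1n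
  calc ∑ d ∈ P, d = ∑ d ∈ P.filter (· ≤ r), d + ∑ d ∈ P.filter (fun d => ¬ d ≤ r), d := by
        simpa using hsplit.symm
    _ = (1 + ∑ d ∈ S, d) + ∑ k ∈ T, M / k := by rw [h1, hfin, h2]
    _ = 1 + ∑ k ∈ Finset.Ico 2 (r + 1), pvC M k := by rw [hRHS]; ring

-- A's helper as a test against the proper-divisor sum
lemma pv_sumA (m : Int) (hm : 2 ≤ m) :
    saber_si_es_numero_perfecto m
      = (m == ((∑ d ∈ (Finset.Ico 1 m.toNat).filter (· ∣ m.toNat), d : Nat) : Int)) := by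
  unfold saber_si_es_numero_perfecto
  rw [pv_foldl_ite_add]
  rw [pv_bridge 1 m (by omega) _ (fun d => if d ∣ m.toNat then d else 0) ?_]
  · rw [Finset.sum_filter (· ∣ m.toNat) (fun d => d)]
    simp only [Nat.cast_sum]
    rw [Bool.eq_iff_iff]
    simp
  · intro k h1 hk
    have hdvd : (PySem.Int.mod m (k : Int) = 0) ↔ (k ∣ m.toNat) := by
      rw [PySem.Int.mod_eq_zero_iff_dvd]
      constructor
      · intro h
        have : ((k : Int)) ∣ ((m.toNat : Nat) : Int) := by
          rwa [Int.toNat_of_nonneg (by omega)]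
        exact_mod_cast this
      · intro h
        have : ((k : Nat) : Int) ∣ ((m.toNat : Nat) : Int) := Int.natCast_dvd_natCast.mpr h
        rwa [Int.toNat_of_nonneg (by omega)] at this
    by_cases h : k ∣ m.toNat
    · simp [h, hdvd.mpr h]
    · have : ¬ (PySem.Int.mod m (k : Int) = 0) := fun hc => h (hdvd.mp hc)
      simp [h, this]

-- B's divisor loop computes the initial value plus the paired contributions
lemma pv_divloop (m : Int) (hm : 0 ≤ m) (k : Nat) :
    ∀ (i s : Int), 1 ≤ i → (((Nat.sqrt m.toNat : Int) + 1) - i).toNat = k →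
      pvDivLoop m i s = s + ((PySem.List.pyRange i ((Nat.sqrt m.toNat : Int) + 1) 1).map
        (fun x => if PySem.Int.mod m x == 0
          then x + (if PySem.Int.floordiv m x != x then PySem.Int.floordiv m x else 0)
          else 0)).sum := by
  induction k with
  | zero =>
    intro i s h1 hk
    have hige : (Nat.sqrt m.toNat : Int) + 1 ≤ i := by omega
    have hno : ¬ i * i ≤ m := by
      intro hle
      have hti : ((i.toNat : Int)) = i := Int.toNat_of_nonneg (by omega)
      have h2 : (((i.toNat * i.toNat : Nat)) : Int) ≤ ((m.toNat : Nat) : Int) := by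
        push_cast
        rw [hti, Int.toNat_of_nonneg hm]
        exact hle
      have h3 : i.toNat * i.toNat ≤ m.toNat := by exact_mod_cast h2
      have h4 : i.toNat ≤ Nat.sqrt m.toNat := Nat.le_sqrt.mpr h3
      omega
    rw [pvDivLoop, dif_neg hno, PySem.List.pyRange_one_eq_nil (by omega)]
    simp
  | succ k ih =>
    intro i s h1 hk
    have hile : i ≤ (Nat.sqrt m.toNat : Int) := by omega
    have hyes : i * i ≤ m := by
      have hti : ((i.toNat : Int)) = i := Int.toNat_of_nonneg (by omega)
      have h4 : i.toNat ≤ Nat.sqrt m.toNat := by omega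
      have h3 : i.toNat * i.toNat ≤ m.toNat := Nat.le_sqrt.mp h4
      have h2 : (((i.toNat * i.toNat : Nat)) : Int) ≤ ((m.toNat : Nat) : Int) := by
        exact_mod_cast h3
      push_cast at h2
      rw [hti, Int.toNat_of_nonneg hm] at h2
      exact h2
    rw [pvDivLoop, dif_pos hyes, PySem.List.pyRange_one_cons (by omega)]
    rw [ih (i + 1) _ (by omega) (by omega)]
    simp only [List.map_cons, List.sum_cons]
    split_ifs with hc1 hc2 <;> ring

-- B's divisor-test sum as a Nat sum
lemma pv_sumB (m : Int) (hm : 2 ≤ m) :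
    pvDivLoop m 2 1
      = 1 + ((∑ k ∈ Finset.Ico 2 (Nat.sqrt m.toNat + 1), pvC m.toNat k : Nat) : Int) := by
  rw [pv_divloop m (by omega) (((Nat.sqrt m.toNat : Int) + 1) - 2).toNat 2 1 (by omega) rfl]
  congr 1
  have hb : (((Nat.sqrt m.toNat : Int) + 1)).toNat = Nat.sqrt m.toNat + 1 := by omega
  rw [pv_bridge 2 ((Nat.sqrt m.toNat : Int) + 1) (by omega) _ (pvC m.toNat) ?_]
  · rw [hb, show Int.toNat 2 = 2 from rfl]
  · intro k h2 hk
    have htn : ((2 : Int)).toNat = 2 := rfl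
    rw [htn] at h2
    have hdvd : (PySem.Int.mod m (k : Int) = 0) ↔ (k ∣ m.toNat) := by
      rw [PySem.Int.mod_eq_zero_iff_dvd]
      constructor
      · intro h
        have : ((k : Int)) ∣ ((m.toNat : Nat) : Int) := by
          rwa [Int.toNat_of_nonneg (by omega)]
        exact_mod_cast this
      · intro h
        have : ((k : Nat) : Int) ∣ ((m.toNat : Nat) : Int) := Int.natCast_dvd_natCast.mpr h
        rwa [Int.toNat_of_nonneg (by omega)] at this
    have hfd : PySem.Int.floordiv m (k : Int) = ((m.toNat / k : Nat) : Int) := by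
      have hmc : m = ((m.toNat : Nat) : Int) := by omega
      rw [hmc]
      exact PySem.Int.floordiv_natCast m.toNat k
    simp only [pvC]
    by_cases h : k ∣ m.toNat
    · have hb1 : (PySem.Int.mod m (k : Int) == 0) = true := beq_iff_eq.mpr (hdvd.mpr h)
      rw [if_pos hb1, if_pos h]
      by_cases hne : m.toNat / k = k
      · have hb2 : (PySem.Int.floordiv m (k : Int) != (k : Int)) = false := by
          rw [hfd]
          simp [hne]
        rw [if_neg (show ¬ (PySem.Int.floordiv m (k : Int) != (k : Int)) = true by simp [hb2]),
          if_neg (not_not_intro hne)]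
        simp
      · have hb2 : (PySem.Int.floordiv m (k : Int) != (k : Int)) = true := by
          rw [hfd]
          exact bne_iff_ne.mpr (fun hc => hne (by exact_mod_cast hc))
        rw [if_pos hb2, if_pos hne, hfd]
        push_cast
        ring
    · have hb1 : (PySem.Int.mod m (k : Int) == 0) = false := by
        simpa using fun hc => h (hdvd.mp hc)
      rw [if_neg (show ¬ (PySem.Int.mod m (k : Int) == 0) = true by simp [hb1]), if_neg h]
      simp

lemma pv_helper_eq (m : Int) (hm : 2 ≤ m) :
    saber_si_es_numero_perfecto m = es_perfecto m := by
  rw [pv_sumA m hm]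
  unfold es_perfecto
  rw [if_neg (by omega), pv_sumB m hm, pv_core m.toNat (by omega)]
  push_cast
  exact Bool.beq_comm

lemma pv_loop_eq (n N : Int) (k : Nat) :
    ∀ (num : Int) (nums : List Int), (N + 1 - num).toNat = k → 2 ≤ num →
      (pvLoopA n N nums num).sum
        = pvLoopB n (PySem.List.pyRange num (N + 1) 1) nums.sum (nums.length : Int) := by
  induction k with
  | zero =>
    intro num nums hk h2
    have hN : N < num := by omega
    rw [pvLoopA, dif_neg (by omega), PySem.List.pyRange_one_eq_nil (by omega)]
    simp [pvLoopB]
  | succ k ih =>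
    intro num nums hk h2
    have hNum : num ≤ N := by omega
    have hkk : (N + 1 - (num + 1)).toNat = k := by omega
    rw [pvLoopA, PySem.List.pyRange_one_cons (show num < N + 1 by omega)]
    simp only [pvLoopB]
    by_cases hc : (nums.length : Int) < n
    · have hge : ¬ ((nums.length : Int) ≥ n) := by omega
      rw [dif_pos (And.intro hc hNum), if_neg hge]
      by_cases hp : saber_si_es_numero_perfecto num
      · have hp' : es_perfecto num = true := by rw [← pv_helper_eq num h2]; exact hp
        rw [if_pos hp, if_pos hp']
        have h := ih (num + 1) (nums ++ [num]) hkk (by omega)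
        simpa using h
      · have hp' : ¬ es_perfecto num = true := by rw [← pv_helper_eq num h2]; exact hp
        rw [if_neg hp, if_neg hp']
        exact ih (num + 1) nums hkk (by omega)
    · have hge : (nums.length : Int) ≥ n := by omega
      rw [dif_neg (fun hcon => hc hcon.1), if_pos hge]

-- ===== VERDICT (by name: the statement is the Claim_ definition above) =====
theorem sumatoria_numeros_perfectos_spec : Claim_equal_sumatoria_numeros_perfectos := by
  intro n N _
  unfold Spec_sumatoria_numeros_perfectos sumatoria_numeros_perfectos sumatoria_numeros_perfectos_alt
  simpa using pv_loop_eq n N (N + 1 - 2).toNat 2 [] rfl (by omega)
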